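-- pv_equiv track=rewrite | github.com/A-Salih16/Inzva_Solutions | 25winter_qual/Validator Royale.py | clash
-- ===== SOURCE A (Python) =====
-- def mirr(list1):
--     dup=list1[0]
--     cnt=1
--     for i  in range(1,len(list1)):
--         if dup==list1[i]:
--             cnt+=1
--         else:
--             dup=list1[i]
--             cnt=1
--         if cnt==2:
--             return 1
--     return 0
--
-- def dup3(list1):
--     dup=list1[0]
--     cnt=1
--     for i  in range(1,len(list1)):
--         if dup==list1[i]:
--             cnt+=1
--         else:
--             dup=list1[i]
--             cnt=1
--         if cnt>=3:
--             return 1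
--     return 0
--
-- def clash(liste):
--     c=set(liste)
--
--     if len(c)>8:
--         return 0
--     if dup3(liste):
--         return 0
--     ismir=mirr(liste)
--     if ismir and len(c)==8:
--         return 0
--     if ismir:
--         c.add("mirror")
--     dict={}
--     for i in c:
--         dict[i]=1
--     liste2=liste.copy()
--     for i in range(1,len(liste)):
--         if liste[i]==liste[i-1]:
--             liste2[i]="mirror"
--     liste=liste2.copy()
--     for i in range(len(liste)):
--         if i>=5:
--             dict[liste[i-5]]=1
--
--         dict[liste[i]]-=1
--         if dict[liste[i]]<0:
--             return 0
--     return 1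
-- ===== SOURCE B (Python) =====
-- def clash(liste):
--     c = set(liste)
--     if len(c) > 8:
--         return 0
--     if any(x == y == z for x, y, z in zip(liste, liste[1:], liste[2:])):
--         return 0
--     ismir = any(x == y for x, y in zip(liste, liste[1:]))
--     if ismir and len(c) == 8:
--         return 0
--     liste2 = [("mirror" if i > 0 and liste[i] == liste[i - 1] else liste[i])
--               for i in range(len(liste))]
--     for i in range(len(liste2)):
--         for j in range(max(0, i - 4), i):
--             if liste2[j] == liste2[i]:
--                 return 0
--     return 1
-- ===== Notes on version B (the rewrite author's own statement) =====
-- stated objective: simpler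
-- what changed: The mirr/dup3 state-machine scans become any() over zipped adjacent pairs/triples, and the count-dict sliding-window loop is replaced by directly comparing each element of liste2 with its previous four elements.
import Mathlib
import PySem

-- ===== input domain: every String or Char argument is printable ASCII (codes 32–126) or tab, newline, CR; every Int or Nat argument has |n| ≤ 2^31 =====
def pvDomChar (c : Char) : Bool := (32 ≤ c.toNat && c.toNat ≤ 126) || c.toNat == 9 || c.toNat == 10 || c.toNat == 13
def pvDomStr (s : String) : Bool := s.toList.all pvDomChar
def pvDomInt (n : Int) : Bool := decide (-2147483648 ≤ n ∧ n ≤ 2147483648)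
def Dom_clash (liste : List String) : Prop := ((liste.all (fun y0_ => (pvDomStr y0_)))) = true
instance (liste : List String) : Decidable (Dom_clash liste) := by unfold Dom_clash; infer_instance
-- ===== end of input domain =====

-- B replaces A's mirr/dup3 state machines by any-over-adjacent-tuples scans and A's
-- count-dict sliding window by a direct compare-with-previous-four loop (objective: simpler).


-- ===== PORT A =====
-- mirr's loop, recursion over the remaining elements with the (dup, cnt) state
def mirrGo (dup : String) (cnt : Int) (rest : List String) : Int :=
  match rest with
  | [] => 0
  | x :: xs =>
    let dup' := if dup == x then dup else x
    let cnt' := if dup == x then cnt + 1 else 1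
    if cnt' == 2 then 1 else mirrGo dup' cnt' xs

-- mirr; on [] Python raises IndexError at list1[0] (excluded by Pre_clash), 0 is a dummy
def mirrA (list1 : List String) : Int :=
  match list1 with
  | [] => 0
  | x :: xs => mirrGo x 1 xs

def dup3Go (dup : String) (cnt : Int) (rest : List String) : Int :=
  match rest with
  | [] => 0
  | x :: xs =>
    let dup' := if dup == x then dup else x
    let cnt' := if dup == x then cnt + 1 else 1
    if cnt' ≥ 3 then 1 else dup3Go dup' cnt' xs

-- dup3; on [] Python raises IndexError (excluded by Pre_clash), 0 is a dummy
def dup3A (list1 : List String) : Int :=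
  match list1 with
  | [] => 0
  | x :: xs => dup3Go x 1 xs

-- liste2: liste.copy() then, for i in range(1, len(liste)), liste2[i] = "mirror"
-- where liste[i] == liste[i-1]  (indices are in range, so pyGetD/pySetD are exact)
def l2A (liste : List String) : List String :=
  (PySem.List.pyRange 1 (PySem.List.len liste) 1).foldl
    (fun l2 i =>
      if PySem.List.pyGetD liste i "" == PySem.List.pyGetD liste (i - 1) ""
      then PySem.List.pySetD l2 i "mirror" else l2) liste

-- the final for-loop over range(len(liste)) with the count dict; Python's dict[liste[i]] -= 1
-- is ported with getD 0: a KeyError is unreachable because every element of liste2 is a key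
-- of the dict (original elements are in c; "mirror" substitutions imply ismir, so "mirror" is added)
def aLoop (l2 : List String) (d : PySem.Dict String Int) (idxs : List Int) : Int :=
  match idxs with
  | [] => 1
  | i :: rest =>
    let d1 := if i ≥ 5 then d.insert (PySem.List.pyGetD l2 (i - 5) "") 1 else d
    let v := d1.getD (PySem.List.pyGetD l2 i "") 0 - 1
    let d2 := d1.insert (PySem.List.pyGetD l2 i "") v
    if v < 0 then 0 else aLoop l2 d2 rest

def clash (liste : List String) : Int :=
  let c := PySem.Set.ofList liste
  if PySem.Set.len c > 8 then 0
  else if dup3A liste ≠ 0 then 0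
  else
    let ismir := mirrA liste
    if ismir ≠ 0 ∧ PySem.Set.len c = 8 then 0
    else
      let c2 := if ismir ≠ 0 then PySem.Set.add c "mirror" else c
      -- for i in c: dict[i] = 1  (all values equal, so the set's iteration order is irrelevant)
      let d : PySem.Dict String Int := c2.foldl (fun d x => d.insert x 1) PySem.Dict.empty
      let liste2 := l2A liste
      aLoop liste2 d (PySem.List.pyRange 0 (PySem.List.len liste2) 1)

-- ===== PORT B =====
-- any(x == y for x, y in zip(liste, liste[1:]))
def adjT (l : List String) : Bool := (l.zip (l.drop 1)).any (fun p => p.1 == p.2)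

-- any(x == y == z for x, y, z in zip(liste, liste[1:], liste[2:]))
def tripT (l : List String) : Bool :=
  (l.zip ((l.drop 1).zip (l.drop 2))).any (fun p => p.1 == p.2.1 && p.2.1 == p.2.2)

-- the list comprehension building liste2 (in-range indices, so getD is exact)
def l2B (liste : List String) : List String :=
  (List.range liste.length).map
    (fun i => if 0 < i && (liste.getD i "" == liste.getD (i - 1) "")
              then "mirror" else liste.getD i "")

-- inner loop: for j in range(max(0, i-4), i): if liste2[j] == liste2[i]: return 0
-- (Nat truncated subtraction i-4 is exactly max(0, i-4))
def violB (l2 : List String) (i : Nat) : Bool :=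
  (List.range' (i - 4) (i - (i - 4))).any (fun j => l2.getD j "" == l2.getD i "")

def bLoop (l2 : List String) (idxs : List Nat) : Int :=
  match idxs with
  | [] => 1
  | i :: rest => if violB l2 i then 0 else bLoop l2 rest

def clash_alt (liste : List String) : Int :=
  let c := PySem.Set.ofList liste
  if PySem.Set.len c > 8 then 0
  else if tripT liste then 0
  else
    let ismir := adjT liste
    if ismir && PySem.Set.len c == 8 then 0
    else
      let liste2 := l2B liste
      bLoop liste2 (List.range liste2.length)

-- ===== PRECONDITION & SPEC =====
-- Pre_ excludes only the empty list, on which A raises IndexError (mirr/dup3 read list1[0]).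
def Pre_clash (liste : List String) : Prop := liste ≠ []
instance (liste : List String) : Decidable (Pre_clash liste) := by unfold Pre_clash; infer_instance
def pvWitness_clash : List String := ["a"]

def Spec_clash (liste : List String) (out : Int) : Prop := out = clash_alt liste
instance (liste : List String) (out : Int) : Decidable (Spec_clash liste out) := by unfold Spec_clash; infer_instance

-- ===== CLAIM (what is proved, stated in full; the proofs are below) =====
def Claim_equal_clash : Prop := ∀ (liste : List String), Dom_clash liste → Pre_clash liste → Spec_clash liste (clash liste)

-- ===== LEMMAS AND PROOFS =====

theorem adjT_cons_cons (x y : String) (ys : List String) :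
    adjT (x :: y :: ys) = ((x == y) || adjT (y :: ys)) := by
  simp [adjT, List.any_cons]

theorem mirrGo_eq (xs : List String) : ∀ x, mirrGo x 1 xs = if adjT (x :: xs) then 1 else 0 := by
  induction xs with
  | nil => intro x; simp [mirrGo, adjT]
  | cons y ys ih =>
    intro x
    rw [adjT_cons_cons]
    by_cases h : x = y
    · simp [mirrGo, h]
    · have hb : (x == y) = false := by simp [h]
      simp [mirrGo, hb, ih y]

theorem mirrA_eq (l : List String) : mirrA l = if adjT l then 1 else 0 := by
  cases l with
  | nil => simp [mirrA, adjT]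
  | cons x xs => exact mirrGo_eq xs x

theorem tripT_short (l : List String) (h : l.length < 3) : tripT l = false := by
  match l, h with
  | [], _ => rfl
  | [x], _ => rfl
  | [x, y], _ => rfl

theorem tripT_cons3 (x y z : String) (zs : List String) :
    tripT (x :: y :: z :: zs) = ((x == y && y == z) || tripT (y :: z :: zs)) := by
  simp [tripT, List.any_cons]

theorem tripT_cons_of_ne (x y : String) (ys : List String) (h : x ≠ y) :
    tripT (x :: y :: ys) = tripT (y :: ys) := by
  cases ys with
  | nil => simp [tripT]
  | cons z zs => rw [tripT_cons3]; simp [h]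

theorem dup3Go_eq (xs : List String) :
    (∀ x, dup3Go x 1 xs = if tripT (x :: xs) then 1 else 0) ∧
    (∀ x, dup3Go x 2 xs =
      match xs with
      | [] => 0
      | y :: ys => if x = y then 1 else (if tripT (y :: ys) then 1 else 0)) := by
  induction xs with
  | nil =>
    constructor
    · intro x; simp [dup3Go, tripT]
    · intro x; simp [dup3Go]
  | cons y ys ih =>
    constructor
    · intro x
      by_cases h : x = y
      · subst h
        have : dup3Go x 1 (x :: ys) = dup3Go x 2 ys := by
          simp [dup3Go]
        rw [this, ih.2 x]
        cases ys with
        | nil => simp [tripT_short]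
        | cons z zs =>
          rw [tripT_cons3]
          by_cases hz : x = z
          · simp [hz]
          · have hb : (x == z) = false := by simp [hz]
            simp [hz, hb, tripT_cons_of_ne x z zs hz]
      · have hb : (x == y) = false := by simp [h]
        have : dup3Go x 1 (y :: ys) = dup3Go y 1 ys := by
          simp [dup3Go, hb]
        rw [this, ih.1 y, tripT_cons_of_ne x y ys h]
    · intro x
      by_cases h : x = y
      · simp [dup3Go, h]
      · have hb : (x == y) = false := by simp [h]
        simp [dup3Go, hb, h, ih.1 y]

theorem dup3A_eq (l : List String) : dup3A l = if tripT l then 1 else 0 := by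
  cases l with
  | nil => simp [dup3A, tripT]
  | cons x xs => exact (dup3Go_eq xs).1 x

theorem adjT_iff (l : List String) :
    adjT l = true ↔ ∃ k, k + 1 < l.length ∧ l.getD k "" = l.getD (k + 1) "" := by
  induction l with
  | nil => simp [adjT]
  | cons x xs ih =>
    cases xs with
    | nil => simp [adjT]
    | cons y ys =>
      rw [adjT_cons_cons, Bool.or_eq_true, beq_iff_eq, ih]
      constructor
      · rintro (h | ⟨k, hk, he⟩)
        · exact ⟨0, by simp, by simpa using h⟩
        · exact ⟨k + 1, by simpa using hk, by simpa using he⟩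
      · rintro ⟨k, hk, he⟩
        cases k with
        | zero => exact Or.inl (by simpa using he)
        | succ k => exact Or.inr ⟨k, by simpa using hk, by simpa using he⟩

theorem getD_foldl_insert_one (lst : List String) :
    ∀ (d : PySem.Dict String Int) (x : String),
      (lst.foldl (fun d x => d.insert x 1) d).getD x 0 = if x ∈ lst then 1 else d.getD x 0 := by
  induction lst with
  | nil => intro d x; simp
  | cons y ys ih =>
    intro d x
    simp only [List.foldl_cons, ih (d.insert y 1) x, PySem.Dict.getD_insert, List.mem_cons]
    by_cases hx : x ∈ ys
    · simp [hx]
    · by_cases hxy : x = y <;> simp [hx, hxy]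

theorem foldSet_length (cond : Nat → Bool) (idxs : List Nat) :
    ∀ (l2 : List String),
      (idxs.foldl (fun l2 i => if cond i then l2.set i "mirror" else l2) l2).length = l2.length := by
  induction idxs with
  | nil => intro l2; rfl
  | cons i rest ih =>
    intro l2
    simp only [List.foldl_cons]
    rw [ih]
    by_cases h : cond i <;> simp [h]

theorem foldSet_getD (cond : Nat → Bool) (idxs : List Nat) :
    ∀ (l2 : List String) (m : Nat), m < l2.length →
      (idxs.foldl (fun l2 i => if cond i then l2.set i "mirror" else l2) l2).getD m ""
        = if m ∈ idxs ∧ cond m then "mirror" else l2.getD m "" := by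
  induction idxs with
  | nil => intro l2 m hm; simp
  | cons i rest ih =>
    intro l2 m hm
    simp only [List.foldl_cons]
    have hlen : (if cond i then l2.set i "mirror" else l2).length = l2.length := by
      by_cases h : cond i <;> simp [h]
    rw [ih _ m (by rw [hlen]; exact hm)]
    by_cases hmem : m ∈ rest ∧ cond m
    · simp [hmem, List.mem_cons]
    · simp only [if_neg hmem]
      by_cases hc : cond i
      · simp only [if_pos hc]
        by_cases hmi : m = i
        · subst hmi
          have hset : (l2.set m "mirror").getD m "" = "mirror" := by
            simp [List.getD_eq_getElem?_getD, hm]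
          rw [hset, if_pos ⟨by simp, hc⟩]
        · have : (l2.set i "mirror").getD m "" = l2.getD m "" := by
            simp [List.getD_eq_getElem?_getD, List.getElem?_set_ne (by omega : i ≠ m)]
          rw [this]
          rw [if_neg]
          intro ⟨h1, h2⟩
          rcases List.mem_cons.mp h1 with h | h
          · exact hmi h
          · exact hmem ⟨h, h2⟩
      · simp only [if_neg hc]
        rw [if_neg]
        intro ⟨h1, h2⟩
        rcases List.mem_cons.mp h1 with h | h
        · exact hc (h ▸ h2)
        · exact hmem ⟨h, h2⟩

theorem l2A_foldShape (liste : List String) :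
    l2A liste = ((List.range (liste.length - 1)).map (fun k => k + 1)).foldl
      (fun l2 i => if (liste.getD i "" == liste.getD (i - 1) "")
                   then l2.set i "mirror" else l2) liste := by
  unfold l2A
  rw [PySem.List.pyRange_one]
  simp only [PySem.List.len_eq]
  rw [List.foldl_map, List.foldl_map]
  have hr : ((liste.length : Int) - 1).toNat = liste.length - 1 := by omega
  rw [hr]
  have hf : (fun (l2 : List String) (k : Nat) =>
      if PySem.List.pyGetD liste (1 + (k : Int)) "" == PySem.List.pyGetD liste (1 + (k : Int) - 1) ""
      then PySem.List.pySetD l2 (1 + (k : Int)) "mirror" else l2)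
      = (fun (l2 : List String) (k : Nat) =>
      if (liste.getD (k + 1) "" == liste.getD (k + 1 - 1) "")
      then l2.set (k + 1) "mirror" else l2) := by
    funext l2 k
    have e1 : (1 + (k : Int)) = ((k + 1 : Nat) : Int) := by push_cast; ring
    have e2 : ((k + 1 : Nat) : Int) - 1 = ((k : Nat) : Int) := by push_cast; ring
    rw [e1, e2, PySem.List.pyGetD_natCast, PySem.List.pyGetD_natCast,
      PySem.List.pySetD_natCast]
    simp
  rw [hf]

theorem l2A_length (liste : List String) : (l2A liste).length = liste.length := by
  rw [l2A_foldShape]; exact foldSet_length _ _ _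

theorem l2B_length (liste : List String) : (l2B liste).length = liste.length := by
  simp [l2B]

theorem l2B_getD (liste : List String) (m : Nat) (hm : m < liste.length) :
    (l2B liste).getD m "" =
      if 0 < m && (liste.getD m "" == liste.getD (m - 1) "") then "mirror" else liste.getD m "" := by
  unfold l2B
  rw [List.getD_eq_getElem _ _ (by simpa using hm)]
  simp [hm]

theorem l2A_eq_l2B (liste : List String) : l2A liste = l2B liste := by
  apply List.ext_getElem (by rw [l2A_length, l2B_length])
  intro m hm1 hm2
  have hm : m < liste.length := by rw [l2A_length] at hm1; exact hm1
  rw [← List.getD_eq_getElem (l2A liste) "" hm1, ← List.getD_eq_getElem (l2B liste) "" hm2]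
  rw [l2B_getD liste m hm, l2A_foldShape]
  rw [foldSet_getD _ _ _ _ (by simpa using hm)]
  have hmem : m ∈ (List.range (liste.length - 1)).map (fun k => k + 1) ↔ 0 < m := by
    simp only [List.mem_map, List.mem_range]
    constructor
    · rintro ⟨k, _, rfl⟩; omega
    · intro h; exact ⟨m - 1, by omega, by omega⟩
  by_cases h0 : 0 < m
  · by_cases hc : (liste.getD m "" == liste.getD (m - 1) "") = true
    · rw [if_pos ⟨hmem.mpr h0, hc⟩,
        if_pos (by simp only [Bool.and_eq_true, decide_eq_true_eq]; exact ⟨h0, hc⟩)]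
    · rw [if_neg (by rintro ⟨_, h⟩; exact hc h),
        if_neg (by simp only [Bool.and_eq_true, decide_eq_true_eq]; rintro ⟨_, h⟩; exact hc h)]
  · rw [if_neg (by rintro ⟨h, _⟩; exact h0 (hmem.mp h)),
      if_neg (by simp only [Bool.and_eq_true, decide_eq_true_eq]; rintro ⟨h, _⟩; exact h0 h)]

theorem violB_iff (l2 : List String) (i : Nat) :
    violB l2 i = true ↔ ∃ j, i - 4 ≤ j ∧ j < i ∧ l2.getD j "" = l2.getD i "" := by
  unfold violB
  rw [List.any_eq_true]
  constructor
  · rintro ⟨j, hj, hb⟩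
    rw [List.mem_range'_1] at hj
    exact ⟨j, hj.1, by omega, beq_iff_eq.mp hb⟩
  · rintro ⟨j, h1, h2, h3⟩
    exact ⟨j, List.mem_range'_1.mpr ⟨h1, by omega⟩, beq_iff_eq.mpr h3⟩

theorem bLoop_eq (l2 : List String) (idxs : List Nat) :
    bLoop l2 idxs = if idxs.any (violB l2) then 0 else 1 := by
  induction idxs with
  | nil => simp [bLoop]
  | cons i rest ih =>
    show (if violB l2 i then (0 : Int) else bLoop l2 rest) = _
    by_cases h : violB l2 i
    · simp [h]
    · simp [h, ih]

-- x occurs among l2[k-5..k-1]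
def winB (l2 : List String) (k : Nat) (x : String) : Bool :=
  (List.range' (k - 5) (k - (k - 5))).any (fun j => l2.getD j "" == x)

theorem winB_iff (l2 : List String) (k : Nat) (x : String) :
    winB l2 k x = true ↔ ∃ j, k - 5 ≤ j ∧ j < k ∧ l2.getD j "" = x := by
  unfold winB
  rw [List.any_eq_true]
  constructor
  · rintro ⟨j, hj, hb⟩
    rw [List.mem_range'_1] at hj
    exact ⟨j, hj.1, by omega, beq_iff_eq.mp hb⟩
  · rintro ⟨j, h1, h2, h3⟩
    exact ⟨j, List.mem_range'_1.mpr ⟨h1, by omega⟩, beq_iff_eq.mpr h3⟩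

theorem aLoop_spec (l2 : List String) (fuel : Nat) :
    ∀ (k : Nat) (d : PySem.Dict String Int), l2.length - k = fuel →
    (∀ x ∈ l2, d.getD x 0 = if winB l2 k x then 0 else 1) →
    (∀ i, i < k → violB l2 i = false) →
    aLoop l2 d (PySem.List.pyRange (k : Int) (PySem.List.len l2) 1)
      = if (List.range' k (l2.length - k)).any (violB l2) then 0 else 1 := by
  induction fuel with
  | zero =>
    intro k d hfuel _ _
    have hk : (l2.length : Int) ≤ (k : Int) := by omega
    rw [PySem.List.len_eq, PySem.List.pyRange_one_eq_nil hk]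
    have : l2.length - k = 0 := by omega
    rw [this]
    simp [aLoop]
  | succ fuel ih =>
    intro k d hfuel H1 H2
    have hk : k < l2.length := by omega
    have hkk : ((k : Int) < (l2.length : Int)) := by exact_mod_cast hk
    rw [PySem.List.len_eq, PySem.List.pyRange_one_cons hkk]
    have hrange : l2.length - k = (l2.length - (k + 1)) + 1 := by omega
    rw [hrange, List.range'_succ]
    simp only [aLoop]
    have hgetk : PySem.List.pyGetD l2 ((k : Nat) : Int) "" = l2.getD k "" :=
      PySem.List.pyGetD_natCast l2 k ""
    -- the dict after the i>=5 reset
    set d1 : PySem.Dict String Int :=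
      (if (k : Int) ≥ 5 then d.insert (PySem.List.pyGetD l2 ((k : Int) - 5) "") 1 else d) with hd1
    -- d1 answers the previous-four-window question, for every element of l2
    have HA : ∀ x ∈ l2,
        ((∃ j, k - 4 ≤ j ∧ j < k ∧ l2.getD j "" = x) → d1.getD x 0 = 0) ∧
        ((¬ ∃ j, k - 4 ≤ j ∧ j < k ∧ l2.getD j "" = x) → d1.getD x 0 = 1) := by
      intro x hx
      by_cases h5 : (k : Int) ≥ 5
      · have hk5 : 5 ≤ k := by exact_mod_cast h5
        have hcast : ((k : Int) - 5) = ((k - 5 : Nat) : Int) := by omega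
        rw [hd1, if_pos h5, hcast, PySem.List.pyGetD_natCast]
        by_cases hx5 : x = l2.getD (k - 5) ""
        · subst hx5
          rw [PySem.Dict.getD_insert_self]
          constructor
          · rintro ⟨j, hj1, hj2, hj3⟩
            exfalso
            have hviol : violB l2 j = true := by
              rw [violB_iff]
              exact ⟨k - 5, by omega, by omega, hj3.symm⟩
            rw [H2 j hj2] at hviol
            exact Bool.false_ne_true hviol
          · intro _; rfl
        · rw [PySem.Dict.getD_insert, if_neg hx5, H1 x hx]
          constructor
          · rintro ⟨j, hj1, hj2, hj3⟩
            rw [if_pos (winB_iff l2 k x |>.mpr ⟨j, by omega, hj2, hj3⟩)]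
          · intro hno
            rw [if_neg ?_]
            intro hw
            rcases (winB_iff l2 k x).mp hw with ⟨j, hj1, hj2, hj3⟩
            by_cases hje : j = k - 5
            · exact hx5 (hje ▸ hj3).symm
            · exact hno ⟨j, by omega, hj2, hj3⟩
      · have hk5 : k < 5 := by omega
        rw [hd1, if_neg h5, H1 x hx]
        constructor
        · rintro ⟨j, hj1, hj2, hj3⟩
          rw [if_pos (winB_iff l2 k x |>.mpr ⟨j, by omega, hj2, hj3⟩)]
        · intro hno
          rw [if_neg ?_]
          intro hw
          rcases (winB_iff l2 k x).mp hw with ⟨j, hj1, hj2, hj3⟩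
          exact hno ⟨j, by omega, hj2, hj3⟩
    have hxk : l2.getD k "" ∈ l2 := by
      rw [List.getD_eq_getElem l2 "" hk]
      exact List.getElem_mem hk
    by_cases hv : violB l2 k = true
    · rcases (violB_iff l2 k).mp hv with ⟨j, hj1, hj2, hj3⟩
      have h0 : d1.getD (PySem.List.pyGetD l2 ((k : Nat) : Int) "") 0 = 0 := by
        rw [hgetk]
        exact (HA _ hxk).1 ⟨j, hj1, hj2, hj3⟩
      rw [h0]
      rw [if_pos (by norm_num : (0 : Int) - 1 < 0)]
      have : violB l2 k = true := hv
      simp [List.any_cons, this]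
    · have hnw : ¬ ∃ j, k - 4 ≤ j ∧ j < k ∧ l2.getD j "" = l2.getD k "" := by
        intro hex
        exact hv ((violB_iff l2 k).mpr hex)
      have h1 : d1.getD (PySem.List.pyGetD l2 ((k : Nat) : Int) "") 0 = 1 := by
        rw [hgetk]
        exact (HA _ hxk).2 hnw
      rw [h1]
      rw [show ((1 : Int) - 1) = 0 by norm_num, if_neg (by norm_num)]
      -- recurse
      have H1' : ∀ x ∈ l2,
          (d1.insert (PySem.List.pyGetD l2 ((k : Nat) : Int) "") 0).getD x 0
            = if winB l2 (k + 1) x then 0 else 1 := by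
        intro x hx
        rw [hgetk]
        by_cases hxe : x = l2.getD k ""
        · subst hxe
          rw [PySem.Dict.getD_insert_self]
          rw [if_pos ((winB_iff l2 (k + 1) _).mpr ⟨k, by omega, by omega, rfl⟩)]
        · rw [PySem.Dict.getD_insert, if_neg hxe]
          cases hwb : winB l2 (k + 1) x with
          | true =>
            rcases (winB_iff l2 (k + 1) x).mp hwb with ⟨j, hj1, hj2, hj3⟩
            have hjk : j < k := by
              rcases Nat.lt_succ_iff_lt_or_eq.mp hj2 with h | h
              · exact h
              · exact absurd (h ▸ hj3).symm hxe
            exact (HA x hx).1 ⟨j, by omega, hjk, hj3⟩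
          | false =>
            apply (HA x hx).2
            rintro ⟨j, hj1, hj2, hj3⟩
            have : winB l2 (k + 1) x = true :=
              (winB_iff l2 (k + 1) x).mpr ⟨j, by omega, by omega, hj3⟩
            rw [hwb] at this
            exact Bool.false_ne_true this
      have H2' : ∀ i, i < k + 1 → violB l2 i = false := by
        intro i hi
        rcases Nat.lt_succ_iff_lt_or_eq.mp hi with h | h
        · exact H2 i h
        · subst h; exact Bool.not_eq_true _ |>.mp hv
      have hrec := ih (k + 1) _ (by omega) H1' H2'
      rw [PySem.List.len_eq] at hrec
      have hcast1 : ((k : Int) + 1) = (((k + 1 : Nat)) : Int) := by push_cast; ring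
      rw [hcast1, hrec]
      have hvf : violB l2 k = false := Bool.not_eq_true _ |>.mp hv
      rw [List.any_cons, hvf, Bool.false_or]

-- every element of liste2 is a key of the dict A builds
theorem l2B_mem_mirror (liste : List String) (_hadj : adjT liste = true) :
    ∀ x ∈ l2B liste, x ∈ PySem.Set.add (PySem.Set.ofList liste) "mirror" := by
  intro x hx
  unfold l2B at hx
  rcases List.mem_map.mp hx with ⟨i, hi, hfx⟩
  rw [List.mem_range] at hi
  by_cases hc : (0 < i && (liste.getD i "" == liste.getD (i - 1) "")) = true
  · rw [if_pos hc] at hfx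
    rw [← hfx]
    exact (PySem.Set.mem_add _ _ _).mpr (Or.inr rfl)
  · rw [if_neg hc] at hfx
    have hmem : x ∈ liste := by
      rw [← hfx, List.getD_eq_getElem liste "" hi]
      exact List.getElem_mem hi
    exact (PySem.Set.mem_add _ _ _).mpr
      (Or.inl ((PySem.Set.mem_ofList liste x).mpr hmem))

theorem l2B_mem_nomirror (liste : List String) (hadj : adjT liste = false) :
    ∀ x ∈ l2B liste, x ∈ PySem.Set.ofList liste := by
  intro x hx
  unfold l2B at hx
  rcases List.mem_map.mp hx with ⟨i, hi, hfx⟩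
  rw [List.mem_range] at hi
  by_cases hc : (0 < i && (liste.getD i "" == liste.getD (i - 1) "")) = true
  · exfalso
    rw [Bool.and_eq_true] at hc
    obtain ⟨h0, he⟩ := hc
    have h0' : 0 < i := by simpa using h0
    have : adjT liste = true := by
      rw [adjT_iff]
      refine ⟨i - 1, by omega, ?_⟩
      have hii : i - 1 + 1 = i := by omega
      rw [hii]
      exact (beq_iff_eq.mp he).symm
    rw [hadj] at this
    exact Bool.false_ne_true this
  · rw [if_neg hc] at hfx
    have hmem : x ∈ liste := by
      rw [← hfx, List.getD_eq_getElem liste "" hi]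
      exact List.getElem_mem hi
    exact (PySem.Set.mem_ofList liste x).mpr hmem

-- A's window loop agrees with B's window loop, for any key set covering liste2
theorem aLoop_eq_bLoop (liste : List String) (c2 : PySem.Set String)
    (hc2 : ∀ x ∈ l2B liste, x ∈ c2) :
    aLoop (l2A liste) (c2.foldl (fun d x => d.insert x 1) PySem.Dict.empty)
      (PySem.List.pyRange 0 (PySem.List.len (l2A liste)) 1)
    = bLoop (l2B liste) (List.range (l2B liste).length) := by
  rw [l2A_eq_l2B]
  have H1 : ∀ x ∈ l2B liste,
      (c2.foldl (fun (d : PySem.Dict String Int) x => d.insert x 1) PySem.Dict.empty).getD x 0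
        = if winB (l2B liste) 0 x then 0 else 1 := by
    intro x hx
    have hw : winB (l2B liste) 0 x = false := by simp [winB]
    rw [hw]
    simp only [Bool.false_eq_true, if_false]
    rw [getD_foldl_insert_one, if_pos (hc2 x hx)]
  have H2 : ∀ i, i < 0 → violB (l2B liste) i = false := by
    intro i hi; omega
  have hmain := aLoop_spec (l2B liste) (l2B liste).length 0
    (c2.foldl (fun (d : PySem.Dict String Int) x => d.insert x 1) PySem.Dict.empty) (by omega) H1 H2
  rw [Nat.cast_zero] at hmain
  rw [hmain, bLoop_eq, Nat.sub_zero, ← List.range_eq_range']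


theorem clash_eq_alt (liste : List String) : clash liste = clash_alt liste := by
  unfold clash clash_alt
  rw [dup3A_eq, mirrA_eq]
  dsimp only
  by_cases h8 : PySem.Set.len (PySem.Set.ofList liste) > 8
  · rw [if_pos h8, if_pos h8]
  rw [if_neg h8, if_neg h8]
  by_cases htrip : tripT liste = true
  · rw [if_pos htrip, if_pos (by norm_num : (1 : Int) ≠ 0), if_pos htrip]
  rw [if_neg htrip, if_neg (by norm_num : ¬ ((0 : Int) ≠ 0)), if_neg htrip]
  by_cases hadj : adjT liste = true
  · rw [if_pos hadj]
    by_cases h8e : PySem.Set.len (PySem.Set.ofList liste) = 8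
    · rw [if_pos ⟨by norm_num, h8e⟩, if_pos (by rw [hadj, h8e]; simp)]
    · rw [if_neg (show ¬((1 : Int) ≠ 0 ∧ PySem.Set.len (PySem.Set.ofList liste) = 8)
            from fun h => h8e h.2),
        if_neg (show ¬((adjT liste && (PySem.Set.len (PySem.Set.ofList liste) == 8)) = true)
            from by rw [hadj, Bool.true_and, beq_iff_eq]; exact h8e),
        if_pos (show (1 : Int) ≠ 0 by norm_num)]
      exact aLoop_eq_bLoop liste _ (l2B_mem_mirror liste hadj)
  · have hadj' : adjT liste = false := Bool.not_eq_true _ |>.mp hadj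
    rw [if_neg hadj]
    rw [if_neg (show ¬((0 : Int) ≠ 0 ∧ PySem.Set.len (PySem.Set.ofList liste) = 8)
          from fun h => h.1 rfl),
      if_neg (show ¬((adjT liste && (PySem.Set.len (PySem.Set.ofList liste) == 8)) = true)
          from by rw [hadj', Bool.false_and]; simp),
      if_neg (show ¬ ((0 : Int) ≠ 0) by norm_num)]
    exact aLoop_eq_bLoop liste _ (l2B_mem_nomirror liste hadj')

-- ===== VERDICT (by name: the statement is the Claim_ definition above) =====
theorem clash_spec : Claim_equal_clash := by
  intro liste _ _
  unfold Spec_clash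
  exact clash_eq_alt liste
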